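-- pv_equiv track=rewrite | github.com/bimurto/system-design-interview | 02-advanced/07-stream-processing/experiment.py | session_windows
-- ===== SOURCE A (Python) =====
-- def session_windows(user_events, gap_seconds=30):
--     """
--     Group a sorted list of events for one user into sessions.
--     A new session begins whenever the gap between consecutive events exceeds
--     gap_seconds (the inactivity timeout).
--
--     Returns a list of sessions: each session is a list of events.
--
--     Real framework equivalent:
--       Flink: EventTimeSessionWindows.withGap(Time.seconds(gap_seconds))
--       Kafka Streams: SessionWindows.ofInactivityGapWithNoGrace(Duration.ofSeconds(gap_seconds))
--     """
--     if not user_events: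
--         return []
--     sorted_events = sorted(user_events, key=lambda e: e["ts"])
--     sessions = [[sorted_events[0]]]
--     for ev in sorted_events[1:]:
--         if ev["ts"] - sessions[-1][-1]["ts"] > gap_seconds:
--             sessions.append([ev])  # gap exceeded — start new session
--         else:
--             sessions[-1].append(ev)
--     return sessions
-- ===== SOURCE B (Python) =====
-- def session_windows(user_events, gap_seconds=30):
--     """Group sorted events into sessions: two-pointer boundary scan, each
--     session emitted as one slice s[i:j] instead of appending into sessions[-1]."""
--     s = sorted(user_events, key=lambda e: e["ts"])
--     n = len(s)
--     sessions = []
--     i = 0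
--     while i < n:
--         j = i + 1
--         while j < n and s[j]["ts"] - s[j - 1]["ts"] <= gap_seconds:
--             j += 1
--         sessions.append(s[i:j])
--         i = j
--     return sessions
-- ===== Notes on version B (the rewrite author's own statement) =====
-- stated objective: alternative
-- what changed: Replaced A's per-event accumulation into sessions[-1] with a two-pointer boundary scan over the sorted list that finds each session's end index and emits the session as one slice s[i:j].
import Mathlib
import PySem

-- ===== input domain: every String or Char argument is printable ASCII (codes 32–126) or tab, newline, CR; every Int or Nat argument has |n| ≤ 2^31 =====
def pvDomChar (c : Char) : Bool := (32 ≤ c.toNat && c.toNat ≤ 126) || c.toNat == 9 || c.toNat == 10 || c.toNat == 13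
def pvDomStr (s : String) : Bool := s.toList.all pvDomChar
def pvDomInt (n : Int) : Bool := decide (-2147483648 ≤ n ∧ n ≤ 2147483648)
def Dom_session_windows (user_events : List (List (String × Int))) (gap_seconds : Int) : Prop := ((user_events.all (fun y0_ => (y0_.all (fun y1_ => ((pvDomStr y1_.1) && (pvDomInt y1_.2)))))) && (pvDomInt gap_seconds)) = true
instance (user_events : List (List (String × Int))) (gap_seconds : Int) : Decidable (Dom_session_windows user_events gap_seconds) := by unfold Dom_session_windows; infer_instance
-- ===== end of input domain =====

-- B replaces A's append-into-last-session accumulation by a two-pointer boundary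
-- scan emitting each session as a slice (alternative decomposition, same cost).


-- ===== PORT A =====
-- e["ts"] : first-match association-list lookup (Pre_ guarantees the key exists)
def pvTs (e : List (String × Int)) : Int := (List.lookup "ts" e).getD 0

-- the body of A's for-loop (sessions[-1][-1] / sessions[-1] as getLastD, in-place
-- append to the last session as dropLast ++ [last ++ [ev]])
def pvStepA (gap_seconds : Int) (sessions : List (List (List (String × Int)))) (ev : List (String × Int)) : List (List (List (String × Int))) :=
  if pvTs ev - pvTs ((sessions.getLastD []).getLastD []) > gap_seconds then
    sessions ++ [[ev]]
  else
    sessions.dropLast ++ [(sessions.getLastD []) ++ [ev]]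

def session_windows (user_events : List (List (String × Int))) (gap_seconds : Int) : List (List (List (String × Int))) :=
  if user_events = [] then []
  else
    let sorted_events := PySem.List.sorted user_events (fun e => pvTs e) false
    match sorted_events with
    | [] => []   -- unreachable: sorted of a nonempty list is nonempty
    | x :: rest => rest.foldl (pvStepA gap_seconds) [[x]]

-- ===== PORT B =====
-- inner while loop of Source B: advance j while the gap to the previous event stays ≤ gap
-- (fuel = s.length - j makes the while loop structurally recursive; it only makes the
-- same computation total)
def pvSpanEnd (s : List (List (String × Int))) (gap_seconds : Int) : Nat → Nat → Nat
  | 0, j => j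
  | fuel + 1, j =>
    if j < s.length then
      if pvTs ((PySem.List.pyGet? s (j : Int)).getD []) - pvTs ((PySem.List.pyGet? s ((j : Int) - 1)).getD []) ≤ gap_seconds then
        pvSpanEnd s gap_seconds fuel (j + 1)
      else j
    else j

-- outer while loop of Source B: emit the slice s[i:j] and continue from j (fuel again)
def pvBuild (s : List (List (String × Int))) (gap_seconds : Int) : Nat → Nat → List (List (List (String × Int)))
  | 0, _ => []
  | fuel + 1, i =>
    if i < s.length then
      PySem.List.slice s (some (i : Int)) (some ((pvSpanEnd s gap_seconds (s.length - (i + 1)) (i + 1) : Nat) : Int)) ::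
        pvBuild s gap_seconds fuel (pvSpanEnd s gap_seconds (s.length - (i + 1)) (i + 1))
    else []

def session_windows_alt (user_events : List (List (String × Int))) (gap_seconds : Int) : List (List (List (String × Int))) :=
  let s := PySem.List.sorted user_events (fun e => pvTs e) false
  pvBuild s gap_seconds s.length 0

-- ===== PRECONDITION & SPEC =====
-- Pre_ excludes exactly the inputs where some event lacks the key "ts": there
-- Python A raises KeyError inside sorted's key function (B raises the same way).
def Pre_session_windows (user_events : List (List (String × Int))) (gap_seconds : Int) : Prop :=
  ∀ e ∈ user_events, "ts" ∈ e.map Prod.fst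
instance (user_events : List (List (String × Int))) (gap_seconds : Int) : Decidable (Pre_session_windows user_events gap_seconds) := by unfold Pre_session_windows; infer_instance

def pvWitness_session_windows : (List (List (String × Int))) × Int := ([[("ts", 5)], [("ts", 100)], [("ts", 20)]], 30)

def Spec_session_windows (user_events : List (List (String × Int))) (gap_seconds : Int) (out : List (List (List (String × Int)))) : Prop := out = session_windows_alt user_events gap_seconds
instance (user_events : List (List (String × Int))) (gap_seconds : Int) (out : List (List (List (String × Int)))) : Decidable (Spec_session_windows user_events gap_seconds out) := by unfold Spec_session_windows; infer_instance

-- ===== CLAIM (what is proved, stated in full; the proofs are below) =====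
def Claim_equal_session_windows : Prop := ∀ (user_events : List (List (String × Int))) (gap_seconds : Int), Dom_session_windows user_events gap_seconds → Pre_session_windows user_events gap_seconds → Spec_session_windows user_events gap_seconds (session_windows user_events gap_seconds)

-- ===== LEMMAS AND PROOFS =====

-- common reference shape: split off one maximal session ("run") at a time
def pvRun (g : Int) (p : List (String × Int)) : List (List (String × Int)) → (List (List (String × Int)) × List (List (String × Int)))
  | [] => ([], [])
  | y :: ys => if pvTs y - pvTs p > g then ([], y :: ys)
               else ((y :: (pvRun g y ys).1), (pvRun g y ys).2)

theorem pvRun_append (g : Int) (l : List (List (String × Int))) : ∀ p, (pvRun g p l).1 ++ (pvRun g p l).2 = l := by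
  induction l with
  | nil => intro p; simp [pvRun]
  | cons y ys ih =>
    intro p
    simp only [pvRun]
    split
    · simp
    · simpa using ih y

theorem pvRun_snd_len_le (g : Int) (p : List (String × Int)) (l : List (List (String × Int))) : (pvRun g p l).2.length ≤ l.length := by
  have h := congrArg List.length (pvRun_append g l p)
  simp at h; omega

def pvChop (g : Int) : List (List (String × Int)) → List (List (List (String × Int)))
  | [] => []
  | x :: xs => (x :: (pvRun g x xs).1) :: pvChop g (pvRun g x xs).2
termination_by l => l.length
decreasing_by
  have := pvRun_snd_len_le g x xs
  simp; omega

-- ----- A's fold equals pvChop -----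
theorem pvFoldA_eq (g : Int) (rest : List (List (String × Int))) :
    ∀ (pre : List (List (List (String × Int)))) (cur : List (List (String × Int))), cur ≠ [] →
      rest.foldl (pvStepA g) (pre ++ [cur]) =
        pre ++ ((cur ++ (pvRun g (cur.getLastD []) rest).1) :: pvChop g (pvRun g (cur.getLastD []) rest).2) := by
  induction rest with
  | nil => intro pre cur hcur; simp [pvRun, pvChop]
  | cons y ys ih =>
    intro pre cur hcur
    simp only [List.foldl_cons]
    by_cases hc : pvTs y - pvTs (cur.getLastD []) > g
    · have hstep : pvStepA g (pre ++ [cur]) y = (pre ++ [cur]) ++ [[y]] := by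
        unfold pvStepA
        rw [List.getLastD_concat, if_pos hc]
      have hrun : pvRun g (cur.getLastD []) (y :: ys) = ([], y :: ys) := by
        simp only [pvRun]; rw [if_pos hc]
      have hchop : pvChop g (y :: ys) = (y :: (pvRun g y ys).1) :: pvChop g (pvRun g y ys).2 := by
        rw [pvChop]
      rw [hstep, ih (pre ++ [cur]) [y] (by simp), hrun, hchop]
      have : ([y] : List (List (String × Int))).getLastD [] = y := rfl
      rw [this]
      simp
    · have hstep : pvStepA g (pre ++ [cur]) y = pre ++ [cur ++ [y]] := by
        unfold pvStepA
        rw [List.getLastD_concat, if_neg hc, List.dropLast_concat]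
      have hrun : pvRun g (cur.getLastD []) (y :: ys) = (y :: (pvRun g y ys).1, (pvRun g y ys).2) := by
        simp only [pvRun]; rw [if_neg hc]
      rw [hstep, ih pre (cur ++ [y]) (by simp), hrun, List.getLastD_concat]
      simp

theorem session_windows_eq_chop (ue : List (List (String × Int))) (g : Int) :
    session_windows ue g = pvChop g (PySem.List.sorted ue (fun e => pvTs e) false) := by
  unfold session_windows
  by_cases hue : ue = []
  · subst hue
    have hnil : PySem.List.sorted ([] : List (List (String × Int))) (fun e => pvTs e) false = [] := by
      rw [PySem.List.sorted_eq_nil_iff]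
    simp [hnil, pvChop]
  · simp only [if_neg hue]
    rcases hs : PySem.List.sorted ue (fun e => pvTs e) false with _ | ⟨x, rest⟩
    · exact absurd ((PySem.List.sorted_eq_nil_iff ue (fun e => pvTs e) false).mp hs) hue
    · have h := pvFoldA_eq g rest [] [x] (by simp)
      have hx : ([x] : List (List (String × Int))).getLastD [] = x := rfl
      rw [hx] at h
      simp only [List.nil_append] at h
      show List.foldl (pvStepA g) [[x]] rest = pvChop g (x :: rest)
      rw [h, pvChop]
      simp

-- ----- pvSpanEnd / pvBuild equal pvChop -----
theorem pvSpanEnd_ge (s : List (List (String × Int))) (g : Int) :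
    ∀ (fuel j : Nat), j ≤ pvSpanEnd s g fuel j := by
  intro fuel
  induction fuel with
  | zero => intro j; simp [pvSpanEnd]
  | succ k ih =>
    intro j
    simp only [pvSpanEnd]
    split
    · split
      · exact le_trans (Nat.le_succ j) (ih (j + 1))
      · exact le_refl j
    · exact le_refl j

theorem pvSpanEnd_eq (s : List (List (String × Int))) (g : Int) :
    ∀ (fuel j : Nat), s.length ≤ j + fuel → 1 ≤ j →
      pvSpanEnd s g fuel j = j + (pvRun g (s.getD (j - 1) []) (s.drop j)).1.length := by
  intro fuel
  induction fuel with
  | zero =>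
    intro j hfj hj
    have : s.drop j = [] := List.drop_eq_nil_of_le (by omega)
    simp [pvSpanEnd, this, pvRun]
  | succ k ih =>
    intro j hfj hj
    simp only [pvSpanEnd]
    by_cases h : j < s.length
    · have hj1 : ((j : Int) - 1) = ((j - 1 : Nat) : Int) := by omega
      have hget : (PySem.List.pyGet? s (j : Int)).getD [] = s[j] := by
        simp [PySem.List.pyGet?_natCast, List.getElem?_eq_getElem h]
      have hget' : (PySem.List.pyGet? s ((j : Int) - 1)).getD [] = s.getD (j - 1) [] := by
        rw [hj1, PySem.List.pyGet?_natCast]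
        simp [List.getD]
      have hdrop : s.drop j = s[j] :: s.drop (j + 1) := List.drop_eq_getElem_cons h
      rw [if_pos h, hget, hget', hdrop]
      by_cases hcond : pvTs s[j] - pvTs (s.getD (j - 1) []) ≤ g
      · rw [if_pos hcond, ih (j + 1) (by omega) (by omega)]
        have : s.getD (j + 1 - 1) [] = s[j] := by simp [List.getD, List.getElem?_eq_getElem h]
        rw [this]
        simp only [pvRun, if_neg (by omega : ¬ pvTs s[j] - pvTs (s.getD (j - 1) []) > g)]
        simp; omega
      · rw [if_neg hcond]
        simp only [pvRun, if_pos (by omega : pvTs s[j] - pvTs (s.getD (j - 1) []) > g)]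
        simp
    · rw [if_neg h]
      have : s.drop j = [] := List.drop_eq_nil_of_le (by omega)
      simp [this, pvRun]

theorem pvBuild_eq (s : List (List (String × Int))) (g : Int) :
    ∀ (fuel i : Nat), s.length ≤ i + fuel → pvBuild s g fuel i = pvChop g (s.drop i) := by
  intro fuel
  induction fuel with
  | zero =>
    intro i hfi
    have : s.drop i = [] := List.drop_eq_nil_of_le (by omega)
    rw [this, pvChop]
    rfl
  | succ k ih =>
    intro i hfi
    simp only [pvBuild]
    by_cases h : i < s.length
    · have hspan := pvSpanEnd_eq s g (s.length - (i + 1)) (i + 1) (by omega) (by omega)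
      have hprev : s.getD (i + 1 - 1) [] = s[i] := by simp [List.getD, List.getElem?_eq_getElem h]
      rw [hprev] at hspan
      set r := pvRun g s[i] (s.drop (i + 1)) with hr
      have hra : r.1 ++ r.2 = s.drop (i + 1) := pvRun_append g (s.drop (i + 1)) s[i]
      have hdrop : s.drop i = s[i] :: s.drop (i + 1) := List.drop_eq_getElem_cons h
      have hslice : PySem.List.slice s (some (i : Int)) (some ((pvSpanEnd s g (s.length - (i + 1)) (i + 1) : Nat) : Int)) = s[i] :: r.1 := by
        rw [PySem.List.slice_natCast, hspan, hdrop]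
        have : i + 1 + r.1.length - i = r.1.length + 1 := by omega
        rw [this, List.take_succ_cons]
        congr 1
        rw [← hra, List.take_left]
      have hdrop2 : s.drop (pvSpanEnd s g (s.length - (i + 1)) (i + 1)) = r.2 := by
        rw [hspan, ← List.drop_drop, ← hra, List.drop_left]
      have hge := pvSpanEnd_ge s g (s.length - (i + 1)) (i + 1)
      rw [if_pos h, hslice, ih (pvSpanEnd s g (s.length - (i + 1)) (i + 1)) (by omega), hdrop2, hdrop]
      rw [pvChop]
    · rw [if_neg h]
      have : s.drop i = [] := List.drop_eq_nil_of_le (by omega)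
      rw [this, pvChop]

-- ===== VERDICT (by name: the statement is the Claim_ definition above) =====
theorem session_windows_spec : Claim_equal_session_windows := by
  intro ue g _ _
  unfold Spec_session_windows
  rw [session_windows_eq_chop]
  unfold session_windows_alt
  rw [pvBuild_eq _ _ _ _ (by omega)]
  simp
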